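-- pv_equiv track=rewrite | github.com/CataHax/lab9.py | ex1.py | swapp
-- ===== SOURCE A (Python) =====
-- def swapp(a):
--
--     lis= []
--     for e in range(len(a)):
--         if e == 0:
--             lis.append(a[4])
--         elif e == 4:
--             lis.append(a[0])
--         else:
--             lis.append(a[e])
--     return lis
-- ===== SOURCE B (Python) =====
-- def swapp(a):
--     b = list(a)
--     if b:
--         b[0], b[4] = b[4], b[0]
--     return b
-- ===== Notes on version B (the rewrite author's own statement) =====
-- stated objective: simpler
-- what changed: B replaces A's index loop with per-index branches by a single whole-list copy followed by one in-place tuple swap of positions 0 and 4.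
import Mathlib
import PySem

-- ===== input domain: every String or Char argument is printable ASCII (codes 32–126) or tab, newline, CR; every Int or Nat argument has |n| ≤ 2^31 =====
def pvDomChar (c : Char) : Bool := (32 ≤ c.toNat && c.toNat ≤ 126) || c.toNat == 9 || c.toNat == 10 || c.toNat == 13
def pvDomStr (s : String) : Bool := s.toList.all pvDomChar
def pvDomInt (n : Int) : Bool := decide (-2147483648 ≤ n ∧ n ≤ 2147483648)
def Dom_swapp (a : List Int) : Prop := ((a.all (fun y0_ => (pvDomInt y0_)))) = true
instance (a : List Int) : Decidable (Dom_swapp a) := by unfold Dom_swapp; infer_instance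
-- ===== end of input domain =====

-- B: one honest line — B copies the list once and swaps positions 0 and 4 in place (simpler decomposition than A's per-index loop).


-- ===== PORT A =====
-- literal port of A's loop over range(len(a)); pyGetD totalizes the a[...] accesses,
-- which cannot raise under Pre_swapp
def swapp (a : List Int) : List Int :=
  (PySem.List.pyRange 0 (a.length : Int) 1).foldl (fun lis e =>
    if e = 0 then lis ++ [PySem.List.pyGetD a 4 0]
    else if e = 4 then lis ++ [PySem.List.pyGetD a 0 0]
    else lis ++ [PySem.List.pyGetD a e 0]) []

-- ===== PORT B =====
-- b = list(a); if b: b[0], b[4] = b[4], b[0]; return b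
def swapp_alt (a : List Int) : List Int :=
  let b := a
  if b = [] then b
  else
    let v4 := PySem.List.pyGetD b 4 0
    let v0 := PySem.List.pyGetD b 0 0
    (b.set 0 v4).set 4 v0

-- ===== PRECONDITION & SPEC =====
-- Pre_ excludes exactly the inputs (lengths 1..4) on which A (and B) raise IndexError at a[4]/b[4].
def Pre_swapp (a : List Int) : Prop := a = [] ∨ 5 ≤ a.length
instance (a : List Int) : Decidable (Pre_swapp a) := by unfold Pre_swapp; infer_instance
def pvWitness_swapp : List Int := [1, 2, 3, 4, 5, 6]
def Spec_swapp (a : List Int) (out : List Int) : Prop := out = swapp_alt a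
instance (a : List Int) (out : List Int) : Decidable (Spec_swapp a out) := by unfold Spec_swapp; infer_instance

-- ===== CLAIM (what is proved, stated in full; the proofs are below) =====
def Claim_equal_swapp : Prop := ∀ (a : List Int), Dom_swapp a → Pre_swapp a → Spec_swapp a (swapp a)

-- ===== LEMMAS AND PROOFS =====

theorem swapp_eq_map (a : List Int) :
    swapp a = (PySem.List.pyRange 0 (a.length : Int) 1).map (fun e =>
      if e = 0 then PySem.List.pyGetD a 4 0
      else if e = 4 then PySem.List.pyGetD a 0 0
      else PySem.List.pyGetD a e 0) := by
  unfold swapp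
  have hfun : (fun (lis : List Int) (e : Int) =>
      if e = 0 then lis ++ [PySem.List.pyGetD a 4 0]
      else if e = 4 then lis ++ [PySem.List.pyGetD a 0 0]
      else lis ++ [PySem.List.pyGetD a e 0]) = (fun lis e => lis ++ [
      if e = 0 then PySem.List.pyGetD a 4 0
      else if e = 4 then PySem.List.pyGetD a 0 0
      else PySem.List.pyGetD a e 0]) := by
    funext lis e; split_ifs <;> rfl
  rw [hfun, PySem.List.foldl_append_singleton_eq_map]
  rfl

-- ===== VERDICT (by name: the statement is the Claim_ definition above) =====
theorem swapp_spec : Claim_equal_swapp := by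
  intro a _ hpre
  unfold Spec_swapp
  rcases hpre with h | h
  · subst h; decide
  · have hne : a ≠ [] := by intro h0; subst h0; simp at h
    rw [swapp_eq_map]
    rw [show swapp_alt a = (a.set 0 (PySem.List.pyGetD a 4 0)).set 4 (PySem.List.pyGetD a 0 0)
      from by unfold swapp_alt; rw [if_neg hne]]
    apply List.ext_getElem
    · simp [PySem.List.length_pyRange_one]
    · intro k hk1 hk2
      have hklen : k < a.length := by
        simpa [PySem.List.length_pyRange_one] using hk1
      rw [List.getElem_map, PySem.List.getElem_pyRange_one]
      simp only [zero_add, List.getElem_set]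
      by_cases h0 : k = 0
      · subst h0
        norm_num
      · by_cases h4 : k = 4
        · subst h4
          norm_num
        · have hki : ((k : Int)) ≠ 0 := by exact_mod_cast h0
          have hki4 : ((k : Int)) ≠ 4 := by exact_mod_cast h4
          rw [if_neg hki, if_neg hki4, if_neg (Ne.symm h0), if_neg (Ne.symm h4),
            PySem.List.pyGetD_natCast]
          simp [List.getD_eq_getElem?_getD, hklen]
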